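-- pv_equiv track=rewrite | github.com/akuwuh/aoc2025 | day3/part1.py | find_max_jolts
-- ===== SOURCE A (Python) =====
-- def find_max_jolts(bank):
--     n = len(bank)
--     first, second= int(bank[n-2]), int(bank[n-1])
--     for i in range(n-3, -1, -1 ): # iterate by length
--         temp_first = int(bank[i])
--         if temp_first >= first:
--             second = max(second,first)
--             first = temp_first
--
--     return first * 10 + second
-- ===== SOURCE B (Python) =====
-- def find_max_jolts(bank):
--     # argmax-then-suffix-scan decomposition: leftmost max of bank[:-1], then max of what follows it
--     n = len(bank)
--     prefix = [int(x) for x in bank[:-1]]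
--     first = max(prefix)
--     p = prefix.index(first)
--     second = max(int(bank[j]) for j in range(p + 1, n))
--     return first * 10 + second
-- ===== Notes on version B (the rewrite author's own statement) =====
-- stated objective: alternative
-- what changed: A's single fused reverse running-max scan with in-loop second tracking is replaced by an argmax-then-suffix decomposition: take the max of bank[:-1], find its leftmost index p, then take the max over bank[p+1:].
-- outside the precondition, e.g. on find_max_jolts(['5']): A returns 55, B raises ValueError
import Mathlib
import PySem

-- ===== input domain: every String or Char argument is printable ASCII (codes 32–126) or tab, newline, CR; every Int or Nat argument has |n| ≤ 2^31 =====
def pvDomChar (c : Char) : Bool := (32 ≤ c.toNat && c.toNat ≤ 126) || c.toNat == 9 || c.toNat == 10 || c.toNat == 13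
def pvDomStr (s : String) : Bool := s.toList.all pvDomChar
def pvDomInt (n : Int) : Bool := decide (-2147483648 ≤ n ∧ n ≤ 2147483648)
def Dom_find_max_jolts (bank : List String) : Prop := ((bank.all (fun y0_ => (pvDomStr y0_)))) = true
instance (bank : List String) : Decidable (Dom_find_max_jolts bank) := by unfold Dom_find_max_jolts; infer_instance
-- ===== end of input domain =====

-- B replaces A's fused reverse running-max scan by an argmax-then-suffix-max decomposition
-- (alternative algorithm of the same cost); equivalence is about the return value.


-- ===== PORT A =====
-- int(bank[i]): negative indices wrap (Python); 0 stands for the raising cases excluded by Pre_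
def pyIntAt (bank : List String) (i : Int) : Int :=
  ((PySem.List.pyGet? bank i).bind PySem.Int.ofStr?).getD 0

def find_max_jolts (bank : List String) : Int :=
  let n : Int := bank.length
  let init : Int × Int := (pyIntAt bank (n - 2), pyIntAt bank (n - 1))
  let fs : Int × Int :=
    (PySem.List.pyRange (n - 3) (-1) (-1)).foldl
      (fun fs i =>
        let temp_first := pyIntAt bank i
        if fs.1 ≤ temp_first then (temp_first, max fs.2 fs.1) else fs)
      init
  fs.1 * 10 + fs.2

-- ===== PORT B =====
-- int(s); 0 stands for the ValueError case excluded by Pre_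
def pyInt (s : String) : Int := (PySem.Int.ofStr? s).getD 0

def find_max_jolts_alt (bank : List String) : Int :=
  let n : Int := bank.length
  let pref := (PySem.List.slice bank none (some (-1))).map pyInt  -- Python's `prefix`
  let first := (PySem.List.max? pref (fun y => y)).getD 0
  let p : Int := ((PySem.List.index? pref first).getD 0 : Nat)
  let second :=
    (PySem.List.max? ((PySem.List.pyRange (p + 1) n 1).map (fun j => pyIntAt bank j))
      (fun y => y)).getD 0
  first * 10 + second

-- ===== PRECONDITION & SPEC =====
-- Pre_ excludes banks of length ≤ 1 (at length 0 A raises IndexError; at length 1 A's value 11*d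
-- comes only from negative-index wraparound of bank[n-2], where B's max over the empty bank[:-1]
-- raises ValueError) and banks containing a string int() cannot parse (A raises ValueError).
def Pre_find_max_jolts (bank : List String) : Prop :=
  2 ≤ bank.length ∧ ∀ s ∈ bank, (PySem.Int.ofStr? s).isSome
instance (bank : List String) : Decidable (Pre_find_max_jolts bank) := by
  unfold Pre_find_max_jolts; infer_instance

def pvWitness_find_max_jolts : List String := ["3", "7", "5"]

def Spec_find_max_jolts (bank : List String) (out : Int) : Prop := out = find_max_jolts_alt bank
instance (bank : List String) (out : Int) : Decidable (Spec_find_max_jolts bank out) := by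
  unfold Spec_find_max_jolts; infer_instance

-- ===== CLAIM (what is proved, stated in full; the proofs are below) =====
def Claim_equal_find_max_jolts : Prop :=
  ∀ (bank : List String), Dom_find_max_jolts bank → Pre_find_max_jolts bank →
    Spec_find_max_jolts bank (find_max_jolts bank)

-- ===== LEMMAS AND PROOFS =====

-- A's loop body as a function of the scanned value
def pvStep (x : Int) (fs : Int × Int) : Int × Int :=
  if fs.1 ≤ x then (x, max fs.2 fs.1) else fs

-- "a is the maximum value of xs"
def IsMaxOf (xs : List Int) (a : Int) : Prop := a ∈ xs ∧ ∀ y ∈ xs, y ≤ a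

lemma isMaxOf_unique {xs : List Int} {a b : Int} (ha : IsMaxOf xs a) (hb : IsMaxOf xs b) :
    a = b :=
  le_antisymm (hb.2 a ha.1) (ha.2 b hb.1)

lemma foldr_max_facts (L : List Int) (s : Int) :
    s ≤ L.foldr max s ∧ (∀ y ∈ L, y ≤ L.foldr max s) ∧
      (L.foldr max s = s ∨ L.foldr max s ∈ L) := by
  induction L with
  | nil => simp
  | cons x t ih =>
    obtain ⟨h1, h2, h3⟩ := ih
    refine ⟨?_, ?_, ?_⟩
    · simpa using le_trans h1 (le_max_right x _)
    · intro y hy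
      rcases List.mem_cons.mp hy with rfl | hy
      · exact le_max_left _ _
      · exact le_trans (h2 y hy) (le_max_right _ _)
    · simp only [List.foldr_cons]
      rcases le_total x (t.foldr max s) with h | h
      · rw [max_eq_right h]
        rcases h3 with h3 | h3
        · exact Or.inl h3
        · exact Or.inr (List.mem_cons_of_mem _ h3)
      · rw [max_eq_left h]; exact Or.inr (List.mem_cons_self)

lemma foldr_max_isMax (L : List Int) (f : Int) : IsMaxOf (L ++ [f]) (L.foldr max f) := by
  obtain ⟨h1, h2, h3⟩ := foldr_max_facts L f
  constructor
  · rcases h3 with h3 | h3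
    · rw [h3]; simp
    · exact List.mem_append_left _ h3
  · intro y hy
    rcases List.mem_append.mp hy with hy | hy
    · exact h2 y hy
    · simp only [List.mem_singleton] at hy; subst hy; exact h1

lemma max?_id_isMax {xs : List Int} (h : xs ≠ []) :
    ∃ a, PySem.List.max? xs (fun y => y) = some a ∧ IsMaxOf xs a := by
  rcases hmax : PySem.List.max? xs (fun y => y) with _ | a
  · exact absurd ((PySem.List.max?_eq_none_iff _ _).mp hmax) h
  · exact ⟨a, rfl, PySem.List.max?_mem hmax, PySem.List.max?_isMax hmax⟩

-- the fused scan computes (max of L++[f], max of s and of what follows the leftmost max)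
lemma pvStep_foldr (L : List Int) (f s : Int) :
    L.foldr pvStep (f, s) =
      (L.foldr max f,
        ((L ++ [f]).drop
            (((PySem.List.index? (L ++ [f]) (L.foldr max f)).getD 0) + 1)).foldr max s) := by
  induction L with
  | nil =>
    simp
  | cons x t ih =>
    have hmax := foldr_max_isMax t f
    set m' := t.foldr max f with hm'
    have hLc : (x :: t) ++ [f] = x :: (t ++ [f]) := rfl
    simp only [List.foldr_cons, ih]
    by_cases hx : m' ≤ x
    · have hmx : max x m' = x := max_eq_left hx
      have hstep : pvStep x (m', ((t ++ [f]).drop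
          (((PySem.List.index? (t ++ [f]) m').getD 0) + 1)).foldr max s) =
          (x, max (((t ++ [f]).drop
          (((PySem.List.index? (t ++ [f]) m').getD 0) + 1)).foldr max s) m') := by
        simp [pvStep, hx]
      rw [hstep, hLc, hmx, PySem.List.index?_cons_self]
      simp only [Option.getD_some, List.drop_succ_cons, List.drop_zero]
      -- second components: max s' m' = foldr max s (t ++ [f])
      obtain ⟨g1, g2, g3⟩ := foldr_max_facts (t ++ [f]) s
      obtain ⟨d1, d2, d3⟩ := foldr_max_facts
        ((t ++ [f]).drop (((PySem.List.index? (t ++ [f]) m').getD 0) + 1)) s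
      have hFm : m' ≤ (t ++ [f]).foldr max s := g2 m' hmax.1
      have hFle : (t ++ [f]).foldr max s ≤ max s m' := by
        rcases g3 with h | h
        · rw [h]; exact le_max_left _ _
        · exact le_trans (hmax.2 _ h) (le_max_right _ _)
      have hs'le : ((t ++ [f]).drop
          (((PySem.List.index? (t ++ [f]) m').getD 0) + 1)).foldr max s ≤ max s m' := by
        rcases d3 with h | h
        · rw [h]; exact le_max_left _ _
        · exact le_trans (hmax.2 _ (List.mem_of_mem_drop h)) (le_max_right _ _)
      have heq : max (((t ++ [f]).drop
          (((PySem.List.index? (t ++ [f]) m').getD 0) + 1)).foldr max s) m' =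
          (t ++ [f]).foldr max s := by omega
      rw [heq]
    · rw [not_le] at hx
      have hmx : max x m' = m' := max_eq_right (le_of_lt hx)
      have hne : x ≠ m' := ne_of_lt hx
      obtain ⟨k, hk⟩ := Option.isSome_iff_exists.mp (((PySem.List.index?_isSome_iff _ _)).mpr hmax.1)
      have hstep : pvStep x (m', ((t ++ [f]).drop
          (((PySem.List.index? (t ++ [f]) m').getD 0) + 1)).foldr max s) =
          (m', ((t ++ [f]).drop
          (((PySem.List.index? (t ++ [f]) m').getD 0) + 1)).foldr max s) := by
        simp [pvStep, not_le.mpr hx]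
      rw [hstep, hLc, hmx, PySem.List.index?_cons_of_ne _ hne, hk]
      simp

-- a foldr over range(0, m) reading v[i] is a foldr over v.take m
lemma pvFoldr_range_take (v : List Int) (g : Int → Int × Int → Int × Int) :
    ∀ (m : Nat) (init : Int × Int), m ≤ v.length →
      (PySem.List.pyRange 0 (m : Int) 1).foldr
          (fun i acc => g (PySem.List.pyGetD v i 0) acc) init
        = (v.take m).foldr g init := by
  intro m
  induction m with
  | zero => intro init _; simp
  | succ m ih =>
    intro init hm
    have hcast : ((m + 1 : Nat) : Int) = (m : Int) + 1 := by push_cast; ring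
    rw [hcast, PySem.List.pyRange_one_succ_right (by positivity), List.foldr_append]
    have hmv : m < v.length := hm
    have hget : PySem.List.pyGetD v (m : Int) 0 = v[m] := by
      simp [PySem.List.pyGetD_natCast, List.getD, List.getElem?_eq_getElem hmv]
    simp only [List.foldr_cons, List.foldr_nil, hget]
    rw [ih _ (le_of_lt hmv)]
    rw [List.take_add_one, List.getElem?_eq_getElem hmv, Option.toList_some, List.foldr_append,
      List.foldr_cons, List.foldr_nil]

-- int(bank[i]) is indexing into the parsed list
lemma pyIntAt_eq (bank : List String) (j : Int) :
    pyIntAt bank j = PySem.List.pyGetD (bank.map pyInt) j 0 := by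
  unfold pyIntAt PySem.List.pyGetD
  rcases h : PySem.List.pyGet? bank j with _ | s
  · have : PySem.List.pyGet? (bank.map pyInt) j = none := by
      unfold PySem.List.pyGet? PySem.List.pyIdx? at h ⊢
      simp only [List.length_map]
      split_ifs at h ⊢ <;> simp_all
    simp [this]
  · have : PySem.List.pyGet? (bank.map pyInt) j = some (pyInt s) := by
      unfold PySem.List.pyGet? PySem.List.pyIdx? at h ⊢
      simp only [List.length_map]
      split_ifs at h ⊢ <;> simp_all
    simp [this, pyInt]

lemma portA_eq (bank : List String) (h2 : 2 ≤ bank.length) :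
    find_max_jolts bank =
      (((bank.map pyInt).take (bank.length - 2)).foldr pvStep
          (pyIntAt bank ((bank.length : Int) - 2), pyIntAt bank ((bank.length : Int) - 1))).1 * 10 +
      (((bank.map pyInt).take (bank.length - 2)).foldr pvStep
          (pyIntAt bank ((bank.length : Int) - 2), pyIntAt bank ((bank.length : Int) - 1))).2 := by
  unfold find_max_jolts
  simp only []
  rw [show PySem.List.pyRange ((bank.length : Int) - 3) (-1) (-1)
      = (PySem.List.pyRange 0 ((bank.length : Int) - 2)).reverse by
    rw [PySem.List.pyRange_neg_one_eq_reverse,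
      show ((-1 : Int) + 1) = 0 by norm_num,
      show ((bank.length : Int) - 3 + 1) = (bank.length : Int) - 2 by ring]]
  rw [List.foldl_reverse]
  have hm : ((bank.length : Int) - 2) = ((bank.length - 2 : Nat) : Int) := by omega
  have hm1 : ((bank.length : Int) - 1) = ((bank.length - 1 : Nat) : Int) := by omega
  rw [hm, hm1]
  have hkey := pvFoldr_range_take (bank.map pyInt) pvStep (bank.length - 2)
    (pyIntAt bank ((bank.length - 2 : Nat) : Int), pyIntAt bank ((bank.length - 1 : Nat) : Int))
    (by simp only [List.length_map]; omega)
  simp only [pyIntAt_eq bank, pvStep] at hkey ⊢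
  rw [← hkey]

lemma main_eq (bank : List String) (h2 : 2 ≤ bank.length) :
    find_max_jolts bank = find_max_jolts_alt bank := by
  have hvl : (bank.map pyInt).length = bank.length := List.length_map ..
  have hvne : bank.map pyInt ≠ [] := List.ne_nil_of_length_pos (by omega)
  have hdlen : (bank.map pyInt).dropLast.length = bank.length - 1 := by
    simp [List.length_dropLast, hvl]
  have hdne : (bank.map pyInt).dropLast ≠ [] := List.ne_nil_of_length_pos (by omega)
  have hlt2 : bank.length - 2 < (bank.map pyInt).length := by omega
  have hlt1 : bank.length - 1 < (bank.map pyInt).length := by omega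
  -- the two base reads, as getD on the parsed list
  have hg2 : pyIntAt bank ((bank.length : Int) - 2)
      = (bank.map pyInt).getD (bank.length - 2) 0 := by
    rw [pyIntAt_eq, show ((bank.length : Int) - 2) = ((bank.length - 2 : Nat) : Int) by
      omega, PySem.List.pyGetD_natCast]
  have hg1 : pyIntAt bank ((bank.length : Int) - 1)
      = (bank.map pyInt).getD (bank.length - 1) 0 := by
    rw [pyIntAt_eq, show ((bank.length : Int) - 1) = ((bank.length - 1 : Nat) : Int) by
      omega, PySem.List.pyGetD_natCast]
  -- take (n-2) ++ [v[n-2]] = v.dropLast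
  have hc : (bank.map pyInt).take (bank.length - 2)
        ++ [(bank.map pyInt).getD (bank.length - 2) 0]
      = (bank.map pyInt).dropLast := by
    rw [List.getD_eq_getElem _ _ hlt2]
    rw [show (bank.map pyInt).take (bank.length - 2)
          ++ [(bank.map pyInt)[bank.length - 2]'hlt2]
        = (bank.map pyInt).take (bank.length - 2 + 1) by
      rw [List.take_add_one, List.getElem?_eq_getElem hlt2]; rfl]
    rw [List.dropLast_eq_take, hvl, show bank.length - 2 + 1 = bank.length - 1 by omega]
  -- the maximum of the prefix, as A computes it
  have hmaxA : IsMaxOf ((bank.map pyInt).dropLast)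
      (((bank.map pyInt).take (bank.length - 2)).foldr max
        ((bank.map pyInt).getD (bank.length - 2) 0)) := by
    rw [← hc]; exact foldr_max_isMax _ _
  -- A's value
  rw [portA_eq bank h2, hg2, hg1, pvStep_foldr, hc]
  -- B's value: unfold and normalise the prefix
  unfold find_max_jolts_alt
  simp only []
  rw [PySem.List.slice_to_neg_one, List.map_dropLast]
  -- B's first = A's max
  obtain ⟨a, ha, hamax⟩ := max?_id_isMax hdne
  rw [ha]
  simp only [Option.getD_some]
  rw [isMaxOf_unique hamax hmaxA]
  -- the two leftmost-max indices coincide (same expression); name it p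
  obtain ⟨k, hk⟩ := Option.isSome_iff_exists.mp
    ((PySem.List.index?_isSome_iff _ _).mpr hmaxA.1)
  have hkk := PySem.List.getElem_of_index?_eq_some hk
  obtain ⟨hklt, -, -⟩ := hkk
  rw [hk]
  simp only [Option.getD_some]
  -- B's scanned suffix is v.drop (k+1)
  have hsuffix : (PySem.List.pyRange ((k : Int) + 1) (bank.length : Int)).map
        (fun j => pyIntAt bank j)
      = (bank.map pyInt).drop (k + 1) := by
    have := PySem.List.map_pyGetD_pyRange' (bank.map pyInt) 0
      (a := (k : Int) + 1) (by positivity)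
    rw [hvl] at this
    simp only [pyIntAt_eq]
    rw [this, show ((k : Int) + 1).toNat = k + 1 by omega]
  rw [hsuffix]
  -- v.drop (k+1) = dropLast.drop (k+1) ++ [last]
  have hE : (bank.map pyInt).drop (k + 1)
      = ((bank.map pyInt).dropLast).drop (k + 1)
        ++ [(bank.map pyInt).getD (bank.length - 1) 0] := by
    conv_lhs => rw [← List.dropLast_append_getLast hvne]
    rw [List.drop_append_of_le_length (by omega),
      List.getLast_eq_getElem, List.getD_eq_getElem _ _ hlt1]
    simp only [hvl]
  have hYne : (bank.map pyInt).drop (k + 1) ≠ [] :=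
    List.ne_nil_of_length_pos (by rw [List.length_drop]; omega)
  obtain ⟨b2, hb2, hb2max⟩ := max?_id_isMax hYne
  rw [hb2]
  simp only [Option.getD_some]
  -- A's second is also the max of that suffix
  have hsA : IsMaxOf ((bank.map pyInt).drop (k + 1))
      ((((bank.map pyInt).dropLast).drop (k + 1)).foldr max
        ((bank.map pyInt).getD (bank.length - 1) 0)) := by
    rw [hE]; exact foldr_max_isMax _ _
  rw [isMaxOf_unique hb2max hsA]

-- ===== VERDICT (by name: the statement is the Claim_ definition above) =====
theorem find_max_jolts_spec : Claim_equal_find_max_jolts := by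
  intro bank _hdom hpre
  unfold Spec_find_max_jolts
  exact main_eq bank hpre.1
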